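-- pv_equiv track=rewrite | github.com/gilbertsahumada/agent-eth-global | singularity-metta/agents/metta-reasoning/agent.py | create_execution_order_steps
-- ===== SOURCE A (Python) =====
-- from typing import List, Dict, Any, Set
--
-- def detect_installation_step(content: str) -> bool:
--     """Detect if chunk contains installation instructions"""
--     install_keywords = ["install", "npm", "yarn", "pip", "forge install", "brew", "apt-get"]
--     content_lower = content.lower()
--     return any(kw in content_lower for kw in install_keywords)
--
-- def detect_deployment_step(content: str) -> bool:
--     """Detect if chunk contains deployment instructions"""
--     deploy_keywords = ["deploy", "deployment", "npx hardhat run", "forge create", "remix"]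
--     content_lower = content.lower()
--     return any(kw in content_lower for kw in deploy_keywords)
--
-- def detect_configuration_step(content: str) -> bool:
--     """Detect if chunk contains configuration"""
--     config_keywords = ["config", "configure", "setup", ".env", "hardhat.config", "foundry.toml"]
--     content_lower = content.lower()
--     return any(kw in content_lower for kw in config_keywords)
--
-- def detect_testing_step(content: str) -> bool:
--     """Detect if chunk contains testing information"""
--     test_keywords = ["test", "testing", "spec", "describe", "it(", "assert", "expect"]
--     content_lower = content.lower()
--     return any(kw in content_lower for kw in test_keywords)
--
-- def create_execution_order_steps(parsed: Dict[str, List[str]], chunks: List[Dict[str, Any]]) -> List[str]: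
--     """
--     Create human-readable execution order steps
--     """
--     steps = []
--
--     # Determine typical order based on detected steps
--     step_order = {
--         "installation": 1,
--         "configuration": 2,
--         "deployment": 3,
--         "testing": 4
--     }
--
--     detected_steps = []
--     for idx, chunk in enumerate(chunks):
--         content = chunk.get("content", "")
--         if detect_installation_step(content):
--             detected_steps.append((1, f"Install dependencies (see documentation section {idx+1})"))
--         if detect_configuration_step(content):
--             detected_steps.append((2, f"Configure project settings (see documentation section {idx+1})"))
--         if detect_deployment_step(content):
--             detected_steps.append((3, f"Deploy contracts (see documentation section {idx+1})"))
--         if detect_testing_step(content):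
--             detected_steps.append((4, f"Run tests (see documentation section {idx+1})"))
--
--     # Sort by order
--     detected_steps.sort(key=lambda x: x[0])
--
--     # Remove duplicates while preserving order
--     seen = set()
--     for _, step in detected_steps:
--         step_key = step.split("(")[0].strip()
--         if step_key not in seen:
--             steps.append(step)
--             seen.add(step_key)
--
--     return steps if steps else ["Follow the documentation steps in order"]
-- ===== SOURCE B (Python) =====
-- from typing import List, Dict, Any
--
-- INSTALL_KEYWORDS = ["install", "npm", "yarn", "pip", "forge install", "brew", "apt-get"]
-- CONFIG_KEYWORDS = ["config", "configure", "setup", ".env", "hardhat.config", "foundry.toml"]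
-- DEPLOY_KEYWORDS = ["deploy", "deployment", "npx hardhat run", "forge create", "remix"]
-- TEST_KEYWORDS = ["test", "testing", "spec", "describe", "it(", "assert", "expect"]
--
-- def create_execution_order_steps(parsed: Dict[str, List[str]], chunks: List[Dict[str, Any]]) -> List[str]:
--     """Single pass over the chunks: remember the first chunk index per step type,
--     then emit the steps directly in the fixed priority order (no sort, no dedup needed)."""
--     first_install = first_config = first_deploy = first_test = None
--     for idx, chunk in enumerate(chunks):
--         content = chunk.get("content", "").lower()
--         if first_install is None and any(kw in content for kw in INSTALL_KEYWORDS):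
--             first_install = idx
--         if first_config is None and any(kw in content for kw in CONFIG_KEYWORDS):
--             first_config = idx
--         if first_deploy is None and any(kw in content for kw in DEPLOY_KEYWORDS):
--             first_deploy = idx
--         if first_test is None and any(kw in content for kw in TEST_KEYWORDS):
--             first_test = idx
--     steps = []
--     if first_install is not None:
--         steps.append(f"Install dependencies (see documentation section {first_install + 1})")
--     if first_config is not None:
--         steps.append(f"Configure project settings (see documentation section {first_config + 1})")
--     if first_deploy is not None:
--         steps.append(f"Deploy contracts (see documentation section {first_deploy + 1})")
--     if first_test is not None:
--         steps.append(f"Run tests (see documentation section {first_test + 1})")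
--     return steps if steps else ["Follow the documentation steps in order"]
-- ===== Notes on version B (the rewrite author's own statement) =====
-- stated objective: alternative
-- what changed: Replaces A's build-a-(priority,step)-list + stable sort + seen-set dedup pipeline by a single pass over the chunks that records the first chunk index per step type and emits the four steps directly in fixed priority order; total cost stays dominated by the keyword scans.
import Mathlib
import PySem

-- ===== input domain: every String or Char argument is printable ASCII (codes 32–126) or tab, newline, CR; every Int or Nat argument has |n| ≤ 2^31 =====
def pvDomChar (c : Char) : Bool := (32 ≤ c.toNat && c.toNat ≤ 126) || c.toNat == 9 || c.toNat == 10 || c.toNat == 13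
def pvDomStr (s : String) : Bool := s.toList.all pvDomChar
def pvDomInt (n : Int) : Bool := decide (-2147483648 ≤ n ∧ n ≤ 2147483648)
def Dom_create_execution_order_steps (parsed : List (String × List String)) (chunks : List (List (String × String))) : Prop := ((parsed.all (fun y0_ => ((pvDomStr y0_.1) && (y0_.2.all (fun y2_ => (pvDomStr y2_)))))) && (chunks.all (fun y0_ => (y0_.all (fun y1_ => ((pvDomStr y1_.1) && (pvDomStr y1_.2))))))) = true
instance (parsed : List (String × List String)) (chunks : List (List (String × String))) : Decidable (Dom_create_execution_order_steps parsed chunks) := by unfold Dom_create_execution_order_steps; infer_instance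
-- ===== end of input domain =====

-- B replaces A's build-list + stable-sort + seen-set-dedup pipeline by a single pass that
-- records the first chunk index per step type and emits the steps in fixed priority order.
-- ===== PORT A =====
-- f-string "<name> (see documentation section {idx+1})", shared by both ports
def pvStepStr (name : String) (idx : Int) : String :=
  name ++ " (see documentation section " ++ PySem.Int.toStr (idx + 1) ++ ")"

def detect_installation_step (content : String) : Bool :=
  let install_keywords := ["install", "npm", "yarn", "pip", "forge install", "brew", "apt-get"]
  let content_lower := PySem.Str.lower content
  install_keywords.any (fun kw => PySem.Str.isIn kw content_lower)

def detect_deployment_step (content : String) : Bool :=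
  let deploy_keywords := ["deploy", "deployment", "npx hardhat run", "forge create", "remix"]
  let content_lower := PySem.Str.lower content
  deploy_keywords.any (fun kw => PySem.Str.isIn kw content_lower)

def detect_configuration_step (content : String) : Bool :=
  let config_keywords := ["config", "configure", "setup", ".env", "hardhat.config", "foundry.toml"]
  let content_lower := PySem.Str.lower content
  config_keywords.any (fun kw => PySem.Str.isIn kw content_lower)

def detect_testing_step (content : String) : Bool :=
  let test_keywords := ["test", "testing", "spec", "describe", "it(", "assert", "expect"]
  let content_lower := PySem.Str.lower content
  test_keywords.any (fun kw => PySem.Str.isIn kw content_lower)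

-- step.split("(")[0].strip(); the [0] always exists (split with a non-empty sep is non-empty),
-- so the total .getD forms are exact here
def pvStepKey (step : String) : String :=
  PySem.Str.strip ((PySem.List.pyGet? ((PySem.Str.split? step "(").getD []) 0).getD "")

def create_execution_order_steps (parsed : List (String × List String)) (chunks : List (List (String × String))) : List String :=
  let detected_steps := (PySem.List.enumerate chunks).foldl (fun acc p =>
      let content := PySem.Dict.getD ⟨p.2⟩ "content" ""
      let acc := if detect_installation_step content then acc ++ [((1 : Int), pvStepStr "Install dependencies" p.1)] else acc
      let acc := if detect_configuration_step content then acc ++ [((2 : Int), pvStepStr "Configure project settings" p.1)] else acc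
      let acc := if detect_deployment_step content then acc ++ [((3 : Int), pvStepStr "Deploy contracts" p.1)] else acc
      let acc := if detect_testing_step content then acc ++ [((4 : Int), pvStepStr "Run tests" p.1)] else acc
      acc) []
  let sortedSteps := PySem.List.sorted detected_steps (fun x => x.1)
  let res := sortedSteps.foldl (fun (st : List String × PySem.Set String) x =>
      let step_key := pvStepKey x.2
      if PySem.Set.contains st.2 step_key then st
      else (st.1 ++ [x.2], PySem.Set.add st.2 step_key)) ([], PySem.Set.empty)
  if res.1.isEmpty then ["Follow the documentation steps in order"] else res.1

-- ===== PORT B =====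
def pvInstallKws : List String := ["install", "npm", "yarn", "pip", "forge install", "brew", "apt-get"]
def pvConfigKws : List String := ["config", "configure", "setup", ".env", "hardhat.config", "foundry.toml"]
def pvDeployKws : List String := ["deploy", "deployment", "npx hardhat run", "forge create", "remix"]
def pvTestKws : List String := ["test", "testing", "spec", "describe", "it(", "assert", "expect"]

def create_execution_order_steps_alt (parsed : List (String × List String)) (chunks : List (List (String × String))) : List String :=
  let st := (PySem.List.enumerate chunks).foldl
    (fun (s : Option Int × Option Int × Option Int × Option Int) p =>
      let content := PySem.Str.lower (PySem.Dict.getD ⟨p.2⟩ "content" "")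
      let f1 := if s.1.isNone && pvInstallKws.any (fun kw => PySem.Str.isIn kw content) then some p.1 else s.1
      let f2 := if s.2.1.isNone && pvConfigKws.any (fun kw => PySem.Str.isIn kw content) then some p.1 else s.2.1
      let f3 := if s.2.2.1.isNone && pvDeployKws.any (fun kw => PySem.Str.isIn kw content) then some p.1 else s.2.2.1
      let f4 := if s.2.2.2.isNone && pvTestKws.any (fun kw => PySem.Str.isIn kw content) then some p.1 else s.2.2.2
      (f1, f2, f3, f4)) (none, none, none, none)
  let steps :=
    (match st.1 with | some i => [pvStepStr "Install dependencies" i] | none => []) ++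
    (match st.2.1 with | some i => [pvStepStr "Configure project settings" i] | none => []) ++
    (match st.2.2.1 with | some i => [pvStepStr "Deploy contracts" i] | none => []) ++
    (match st.2.2.2 with | some i => [pvStepStr "Run tests" i] | none => [])
  if steps.isEmpty then ["Follow the documentation steps in order"] else steps

-- ===== PRECONDITION & SPEC =====
def Spec_create_execution_order_steps (parsed : List (String × List String)) (chunks : List (List (String × String))) (out : List String) : Prop := out = create_execution_order_steps_alt parsed chunks
instance (parsed : List (String × List String)) (chunks : List (List (String × String))) (out : List String) : Decidable (Spec_create_execution_order_steps parsed chunks out) := by unfold Spec_create_execution_order_steps; infer_instance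

-- ===== CLAIM (what is proved, stated in full; the proofs are below) =====
def Claim_equal_create_execution_order_steps : Prop := ∀ (parsed : List (String × List String)) (chunks : List (List (String × String))), Dom_create_execution_order_steps parsed chunks → Spec_create_execution_order_steps parsed chunks (create_execution_order_steps parsed chunks)

-- ===== LEMMAS AND PROOFS =====

-- ---- generic facts about PySem.Chars.splitOn.go (fuel-indexed scanner of str.split) ----
theorem pv_go_acc (sep : List Char) : ∀ (fuel : Nat) (l cur : List Char) (acc : List (List Char)),
    PySem.Chars.splitOn.go sep fuel l cur acc
      = acc.reverse ++ PySem.Chars.splitOn.go sep fuel l cur [] := by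
  intro fuel
  induction fuel with
  | zero => intro l cur acc; simp [PySem.Chars.splitOn.go]
  | succ f ih =>
    intro l cur acc
    cases l with
    | nil => simp [PySem.Chars.splitOn.go]
    | cons c rest =>
      simp only [PySem.Chars.splitOn.go]
      by_cases h : sep.isPrefixOf (c :: rest) = true
      · simp only [h, if_true]
        rw [ih _ _ (cur.reverse :: acc), ih _ _ [cur.reverse]]
        simp
      · simp only [Bool.not_eq_true] at h
        simp only [h, Bool.false_eq_true, if_false]
        exact ih _ _ acc

theorem pv_go_through (c : Char) : ∀ (a : List Char), c ∉ a → ∀ (fuel : Nat) (r cur : List Char) (acc : List (List Char)),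
    a.length < fuel →
    PySem.Chars.splitOn.go [c] fuel (a ++ c :: r) cur acc
      = PySem.Chars.splitOn.go [c] (fuel - (a.length + 1)) r [] ((cur.reverse ++ a) :: acc) := by
  intro a
  induction a with
  | nil =>
    intro _ fuel r cur acc hf
    obtain ⟨f, rfl⟩ : ∃ f, fuel = f + 1 := ⟨fuel - 1, by omega⟩
    simp [PySem.Chars.splitOn.go, List.isPrefixOf]
  | cons x a' ih =>
    intro hmem fuel r cur acc hf
    obtain ⟨f, rfl⟩ : ∃ f, fuel = f + 1 := ⟨fuel - 1, by omega⟩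
    have hxc : (c == x) = false := by
      simp only [List.mem_cons, not_or] at hmem
      simp; exact fun h => hmem.1 h
    simp only [List.cons_append, PySem.Chars.splitOn.go, List.isPrefixOf, hxc, Bool.false_and,
      Bool.false_eq_true, if_false]
    rw [ih (by simp only [List.mem_cons, not_or] at hmem; exact hmem.2) f r (x :: cur) acc (by simp at hf ⊢; omega)]
    simp only [List.reverse_cons, List.append_assoc, List.singleton_append, List.length_cons]
    congr 1
    omega

theorem pv_splitOn_head (a r : List Char) (c : Char) (h : c ∉ a) :
    (PySem.Chars.splitOn (a ++ c :: r) [c]).head? = some a := by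
  unfold PySem.Chars.splitOn
  rw [pv_go_through c a h _ r [] [] (by simp)]
  rw [pv_go_acc]
  simp

-- the dedup key step.split("(")[0].strip() of a step string, for every index
theorem pv_key_gen (name : String) (i : Int)
    (h1 : '(' ∉ (name ++ " ").toList)
    (h2 : PySem.Chars.strip ((name ++ " ").toList) = name.toList) :
    pvStepKey (pvStepStr name i) = name := by
  unfold pvStepKey
  have hsplit : (pvStepStr name i).toList
      = (name ++ " ").toList ++ '(' :: ("see documentation section ".toList ++ (PySem.Int.toStr (i+1)).toList ++ [')']) := by
    simp [pvStepStr, String.toList_append]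
  have hhead := pv_splitOn_head ((name ++ " ").toList)
      ("see documentation section ".toList ++ (PySem.Int.toStr (i+1)).toList ++ [')']) '(' h1
  rw [← hsplit] at hhead
  apply String.toList_inj.mp
  rw [PySem.Str.toList_strip]
  have : ((PySem.List.pyGet? ((PySem.Str.split? (pvStepStr name i) "(").getD []) 0).getD "")
      = String.ofList ((name ++ " ").toList) := by
    simp only [PySem.Str.split?, PySem.Chars.split?]
    norm_num
    rw [if_neg (show ¬("(" : String) = "" by decide)]
    simp only [show ("(" : String).toList = ['('] from rfl, Option.map_some, Option.getD_some]
    rw [show (PySem.List.pyGet? ((PySem.Chars.splitOn (pvStepStr name i).toList ['(']).map String.ofList) 0)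
        = ((PySem.Chars.splitOn (pvStepStr name i).toList ['(']).map String.ofList)[(0:Nat)]? from
      PySem.List.pyGet?_natCast _ 0]
    rw [← List.head?_eq_getElem?]
    rw [List.head?_map, hhead]
    simp [String.ofList_toList]
  rw [this]
  rw [String.toList_ofList]
  exact h2

theorem pv_key_install (i : Int) : pvStepKey (pvStepStr "Install dependencies" i) = "Install dependencies" :=
  pv_key_gen _ i (by decide) (by decide)
theorem pv_key_config (i : Int) : pvStepKey (pvStepStr "Configure project settings" i) = "Configure project settings" :=
  pv_key_gen _ i (by decide) (by decide)
theorem pv_key_deploy (i : Int) : pvStepKey (pvStepStr "Deploy contracts" i) = "Deploy contracts" :=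
  pv_key_gen _ i (by decide) (by decide)
theorem pv_key_test (i : Int) : pvStepKey (pvStepStr "Run tests" i) = "Run tests" :=
  pv_key_gen _ i (by decide) (by decide)

-- ---- A's stable sort on keys 1..4 is the concatenation of the four key classes ----
theorem pv_insertBy_append {α : Type} (before : α → α → Bool) (x : α) (as bs : List α)
    (h : ∀ a ∈ as, before x a = false) :
    PySem.List.insertBy before x (as ++ bs) = as ++ PySem.List.insertBy before x bs := by
  induction as with
  | nil => simp
  | cons a as ih =>
    have ha : before x a = false := h a (by simp)
    simp only [List.cons_append, PySem.List.insertBy, ha, Bool.false_eq_true, if_false]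
    have := ih (fun a ha' => h a (by simp [ha']))
    rw [this]

theorem pv_insertBy_front {α : Type} (before : α → α → Bool) (x : α) (bs : List α)
    (h : ∀ b ∈ bs, before x b = true) :
    PySem.List.insertBy before x bs = x :: bs := by
  cases bs with
  | nil => rfl
  | cons b bs => simp [PySem.List.insertBy, h b (by simp)]

theorem pv_insertBy_groups (x : Int × String) (A B : List (Int × String))
    (hA : ∀ a ∈ A, decide (x.1 < a.1) = false) (hB : ∀ b ∈ B, decide (x.1 < b.1) = true) :
    PySem.List.insertBy (fun a b => decide (a.1 < b.1)) x (A ++ B) = A ++ x :: B := by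
  rw [pv_insertBy_append _ x A B hA, pv_insertBy_front _ x B hB]

theorem pv_sorted_14 (l : List (Int × String))
    (h : ∀ x ∈ l, x.1 = 1 ∨ x.1 = 2 ∨ x.1 = 3 ∨ x.1 = 4) :
    PySem.List.sorted l (fun x => x.1)
      = l.filter (fun x => x.1 == 1) ++ l.filter (fun x => x.1 == 2)
        ++ l.filter (fun x => x.1 == 3) ++ l.filter (fun x => x.1 == 4) := by
  rw [PySem.List.sorted_eq_foldl_insertBy]
  induction l using List.reverseRecOn with
  | nil => simp
  | append_singleton l x ih =>
    rw [List.foldl_append, List.foldl_cons, List.foldl_nil]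
    rw [ih (fun y hy => h y (by simp [hy]))]
    have key_mem : ∀ (k : Int) (y : Int × String), y ∈ l.filter (fun x => x.1 == k) → y.1 = k := by
      intro k y hy
      have := List.of_mem_filter hy
      simpa using this
    have hx := h x (by simp)
    have efilt : ∀ k : Int, (l ++ [x]).filter (fun y => y.1 == k)
        = l.filter (fun y => y.1 == k) ++ (if x.1 == k then [x] else []) := by
      intro k; simp [List.filter_append, List.filter_cons]
    rcases hx with hx | hx | hx | hx
    · rw [show l.filter (fun x => x.1 == 1) ++ l.filter (fun x => x.1 == 2)
            ++ l.filter (fun x => x.1 == 3) ++ l.filter (fun x => x.1 == 4)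
          = l.filter (fun x => x.1 == 1) ++ (l.filter (fun x => x.1 == 2)
            ++ (l.filter (fun x => x.1 == 3) ++ l.filter (fun x => x.1 == 4))) by simp [List.append_assoc]]
      rw [pv_insertBy_groups x _ _
        (by intro a ha; have := key_mem 1 a ha; simp [this, hx])
        (by intro b hb
            rcases List.mem_append.mp hb with hb | hb
            · have := key_mem 2 b hb; simp [this, hx]
            · rcases List.mem_append.mp hb with hb | hb
              · have := key_mem 3 b hb; simp [this, hx]
              · have := key_mem 4 b hb; simp [this, hx])]
      simp [efilt, hx, List.append_assoc]
    · rw [show l.filter (fun x => x.1 == 1) ++ l.filter (fun x => x.1 == 2)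
            ++ l.filter (fun x => x.1 == 3) ++ l.filter (fun x => x.1 == 4)
          = (l.filter (fun x => x.1 == 1) ++ l.filter (fun x => x.1 == 2))
            ++ (l.filter (fun x => x.1 == 3) ++ l.filter (fun x => x.1 == 4)) by simp [List.append_assoc]]
      rw [pv_insertBy_groups x _ _
        (by intro a ha
            rcases List.mem_append.mp ha with ha | ha
            · have := key_mem 1 a ha; simp [this, hx]
            · have := key_mem 2 a ha; simp [this, hx])
        (by intro b hb
            rcases List.mem_append.mp hb with hb | hb
            · have := key_mem 3 b hb; simp [this, hx]
            · have := key_mem 4 b hb; simp [this, hx])]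
      simp [efilt, hx, List.append_assoc]
    · rw [show l.filter (fun x => x.1 == 1) ++ l.filter (fun x => x.1 == 2)
            ++ l.filter (fun x => x.1 == 3) ++ l.filter (fun x => x.1 == 4)
          = (l.filter (fun x => x.1 == 1) ++ l.filter (fun x => x.1 == 2)
            ++ l.filter (fun x => x.1 == 3)) ++ l.filter (fun x => x.1 == 4) by simp [List.append_assoc]]
      rw [pv_insertBy_groups x _ _
        (by intro a ha
            rcases List.mem_append.mp ha with ha | ha
            · rcases List.mem_append.mp ha with ha | ha
              · have := key_mem 1 a ha; simp [this, hx]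
              · have := key_mem 2 a ha; simp [this, hx]
            · have := key_mem 3 a ha; simp [this, hx])
        (by intro b hb; have := key_mem 4 b hb; simp [this, hx])]
      simp [efilt, hx, List.append_assoc]
    · rw [show l.filter (fun x => x.1 == 1) ++ l.filter (fun x => x.1 == 2)
            ++ l.filter (fun x => x.1 == 3) ++ l.filter (fun x => x.1 == 4)
          = (l.filter (fun x => x.1 == 1) ++ l.filter (fun x => x.1 == 2)
            ++ l.filter (fun x => x.1 == 3) ++ l.filter (fun x => x.1 == 4)) ++ [] by simp]
      rw [pv_insertBy_groups x _ []
        (by intro a ha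
            rcases List.mem_append.mp ha with ha | ha
            · rcases List.mem_append.mp ha with ha | ha
              · rcases List.mem_append.mp ha with ha | ha
                · have := key_mem 1 a ha; simp [this, hx]
                · have := key_mem 2 a ha; simp [this, hx]
              · have := key_mem 3 a ha; simp [this, hx]
            · have := key_mem 4 a ha; simp [this, hx])
        (by intro b hb; simp at hb)]
      simp [efilt, hx, List.append_assoc]

-- ---- first-hit characterisations ----
theorem pv_flatMap_head {α β : Type} (d : α → Bool) (h : α → β) (l : List α) :
    (l.flatMap (fun p => if d p then [h p] else [])).head? = (l.find? d).map h := by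
  induction l with
  | nil => simp
  | cons p l ih =>
    simp only [List.flatMap_cons, List.find?_cons]
    by_cases hd : d p
    · simp [hd]
    · simp only [Bool.not_eq_true] at hd; simp [hd, ih]

theorem pv_first_fold {α : Type} (d : α → Bool) :
    ∀ (l : List (Int × α)) (o : Option Int),
    l.foldl (fun o p => if o.isNone && d p.2 then some p.1 else o) o
      = (match o with
         | some a => some a
         | none => (l.find? (fun p => d p.2)).map Prod.fst) := by
  intro l
  induction l with
  | nil => intro o; cases o <;> simp
  | cons p l ih =>
    intro o
    cases o with
    | some a => simp only [List.foldl_cons, Option.isNone_some, Bool.false_and,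
        Bool.false_eq_true, if_false]; exact ih (some a)
    | none =>
      simp only [List.foldl_cons, Option.isNone_none, Bool.true_and, List.find?_cons]
      by_cases hd : d p.2
      · simp only [hd, if_true, ih (some p.1)]; simp [hd]
      · simp only [Bool.not_eq_true] at hd
        simp only [hd, Bool.false_eq_true, if_false, Bool.and_false]
        rw [ih none]

-- ---- the dedup loop over the sorted list ----
theorem pv_contains_add_self (s : PySem.Set String) (K : String) :
    PySem.Set.contains (PySem.Set.add s K) K = true := by
  simp only [PySem.Set.add]
  split_ifs with h
  · exact h
  · simp [PySem.Set.contains]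

theorem pv_contains_false (s : PySem.Set String) (K : String) (h : K ∉ s) :
    PySem.Set.contains s K = false := by
  simp only [PySem.Set.contains]
  simpa using h

theorem pv_dedup_skip :
    ∀ (g : List (Int × String)) (st : List String × PySem.Set String),
    (∀ e ∈ g, PySem.Set.contains st.2 (pvStepKey e.2) = true) →
    g.foldl (fun (st : List String × PySem.Set String) x =>
      if PySem.Set.contains st.2 (pvStepKey x.2) then st
      else (st.1 ++ [x.2], PySem.Set.add st.2 (pvStepKey x.2))) st = st := by
  intro g
  induction g with
  | nil => intro st _; rfl
  | cons e g ih =>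
    intro st h
    simp only [List.foldl_cons, h e (by simp), if_true]
    exact ih st (fun e' he' => h e' (by simp [he']))

theorem pv_dedup_group (g : List (Int × String)) (K : String)
    (hg : ∀ e ∈ g, pvStepKey e.2 = K) (st : List String) (seen : PySem.Set String)
    (hK : PySem.Set.contains seen K = false) :
    g.foldl (fun (st : List String × PySem.Set String) x =>
      if PySem.Set.contains st.2 (pvStepKey x.2) then st
      else (st.1 ++ [x.2], PySem.Set.add st.2 (pvStepKey x.2))) (st, seen)
      = (st ++ (g.head?.map Prod.snd).toList,
         if g.head?.isNone then seen else PySem.Set.add seen K) := by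
  cases g with
  | nil => simp
  | cons e t =>
    simp only [List.foldl_cons, hg e (by simp), hK, Bool.false_eq_true, if_false,
      List.head?_cons, Option.map_some, Option.toList_some, Option.isNone_some]
    exact pv_dedup_skip t (st ++ [e.2], PySem.Set.add seen K)
      (fun e' he' => by rw [hg e' (by simp [he'])]; exact pv_contains_add_self seen K)

-- ===== MAIN PROOF =====
-- proof-side abbreviations for the four detectors / the per-chunk contribution of A's first loop
def pvD1 (chunk : List (String × String)) : Bool := detect_installation_step (PySem.Dict.getD ⟨chunk⟩ "content" "")
def pvD2 (chunk : List (String × String)) : Bool := detect_configuration_step (PySem.Dict.getD ⟨chunk⟩ "content" "")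
def pvD3 (chunk : List (String × String)) : Bool := detect_deployment_step (PySem.Dict.getD ⟨chunk⟩ "content" "")
def pvD4 (chunk : List (String × String)) : Bool := detect_testing_step (PySem.Dict.getD ⟨chunk⟩ "content" "")

def pvEnt (p : Int × List (String × String)) : List (Int × String) :=
  (if pvD1 p.2 then [((1 : Int), pvStepStr "Install dependencies" p.1)] else [])
  ++ (if pvD2 p.2 then [((2 : Int), pvStepStr "Configure project settings" p.1)] else [])
  ++ (if pvD3 p.2 then [((3 : Int), pvStepStr "Deploy contracts" p.1)] else [])
  ++ (if pvD4 p.2 then [((4 : Int), pvStepStr "Run tests" p.1)] else [])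

theorem pv_filter_ent_1 (l : List (Int × List (String × String))) :
    (l.flatMap pvEnt).filter (fun x => x.1 == 1)
      = l.flatMap (fun p => if pvD1 p.2 then [((1 : Int), pvStepStr "Install dependencies" p.1)] else []) := by
  rw [List.filter_flatMap,
    show (fun x => (pvEnt x).filter (fun x => x.1 == 1))
      = (fun p => if pvD1 p.2 then [((1 : Int), pvStepStr "Install dependencies" p.1)] else []) from
    funext fun p => by
      simp only [pvEnt, List.filter_append]
      split_ifs <;> simp]

theorem pv_filter_ent_2 (l : List (Int × List (String × String))) :
    (l.flatMap pvEnt).filter (fun x => x.1 == 2)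
      = l.flatMap (fun p => if pvD2 p.2 then [((2 : Int), pvStepStr "Configure project settings" p.1)] else []) := by
  rw [List.filter_flatMap,
    show (fun x => (pvEnt x).filter (fun x => x.1 == 2))
      = (fun p => if pvD2 p.2 then [((2 : Int), pvStepStr "Configure project settings" p.1)] else []) from
    funext fun p => by
      simp only [pvEnt, List.filter_append]
      split_ifs <;> simp]

theorem pv_filter_ent_3 (l : List (Int × List (String × String))) :
    (l.flatMap pvEnt).filter (fun x => x.1 == 3)
      = l.flatMap (fun p => if pvD3 p.2 then [((3 : Int), pvStepStr "Deploy contracts" p.1)] else []) := by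
  rw [List.filter_flatMap,
    show (fun x => (pvEnt x).filter (fun x => x.1 == 3))
      = (fun p => if pvD3 p.2 then [((3 : Int), pvStepStr "Deploy contracts" p.1)] else []) from
    funext fun p => by
      simp only [pvEnt, List.filter_append]
      split_ifs <;> simp]

theorem pv_filter_ent_4 (l : List (Int × List (String × String))) :
    (l.flatMap pvEnt).filter (fun x => x.1 == 4)
      = l.flatMap (fun p => if pvD4 p.2 then [((4 : Int), pvStepStr "Run tests" p.1)] else []) := by
  rw [List.filter_flatMap,
    show (fun x => (pvEnt x).filter (fun x => x.1 == 4))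
      = (fun p => if pvD4 p.2 then [((4 : Int), pvStepStr "Run tests" p.1)] else []) from
    funext fun p => by
      simp only [pvEnt, List.filter_append]
      split_ifs <;> simp]

theorem pv_dedup_4 (g1 g2 g3 g4 : List (Int × String)) (K1 K2 K3 K4 : String)
    (hg1 : ∀ e ∈ g1, pvStepKey e.2 = K1) (hg2 : ∀ e ∈ g2, pvStepKey e.2 = K2)
    (hg3 : ∀ e ∈ g3, pvStepKey e.2 = K3) (hg4 : ∀ e ∈ g4, pvStepKey e.2 = K4)
    (h12 : K1 ≠ K2) (h13 : K1 ≠ K3) (h14 : K1 ≠ K4)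
    (h23 : K2 ≠ K3) (h24 : K2 ≠ K4) (h34 : K3 ≠ K4) :
    ((g1 ++ g2 ++ g3 ++ g4).foldl (fun (st : List String × PySem.Set String) x =>
      if PySem.Set.contains st.2 (pvStepKey x.2) then st
      else (st.1 ++ [x.2], PySem.Set.add st.2 (pvStepKey x.2))) ([], PySem.Set.empty)).1
      = (g1.head?.map Prod.snd).toList ++ (g2.head?.map Prod.snd).toList
        ++ (g3.head?.map Prod.snd).toList ++ (g4.head?.map Prod.snd).toList := by
  rw [List.foldl_append, List.foldl_append, List.foldl_append]
  rw [pv_dedup_group g1 K1 hg1 [] PySem.Set.empty rfl]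
  have hm1 : ∀ x, x ∈ (if g1.head?.isNone then PySem.Set.empty else PySem.Set.add PySem.Set.empty K1) → x = K1 := by
    intro x hx
    split at hx
    · simp [PySem.Set.empty] at hx
    · rcases (PySem.Set.mem_add _ _ _).mp hx with h | h
      · simp [PySem.Set.empty] at h
      · exact h
  rw [pv_dedup_group g2 K2 hg2 _ _
    (pv_contains_false _ K2 (fun hmem => h12 (hm1 K2 hmem).symm))]
  have hm2 : ∀ x, x ∈ (if g2.head?.isNone
      then (if g1.head?.isNone then PySem.Set.empty else PySem.Set.add PySem.Set.empty K1)
      else PySem.Set.add (if g1.head?.isNone then PySem.Set.empty else PySem.Set.add PySem.Set.empty K1) K2) →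
      x = K1 ∨ x = K2 := by
    intro x hx
    split at hx
    · exact Or.inl (hm1 x hx)
    · rcases (PySem.Set.mem_add _ _ _).mp hx with h | h
      · exact Or.inl (hm1 x h)
      · exact Or.inr h
  rw [pv_dedup_group g3 K3 hg3 _ _
    (pv_contains_false _ K3 (fun hmem => by
      rcases hm2 K3 hmem with h | h
      · exact h13 h.symm
      · exact h23 h.symm))]
  have hm3 : ∀ x, x ∈ (if g3.head?.isNone
      then (if g2.head?.isNone
        then (if g1.head?.isNone then PySem.Set.empty else PySem.Set.add PySem.Set.empty K1)
        else PySem.Set.add (if g1.head?.isNone then PySem.Set.empty else PySem.Set.add PySem.Set.empty K1) K2)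
      else PySem.Set.add (if g2.head?.isNone
        then (if g1.head?.isNone then PySem.Set.empty else PySem.Set.add PySem.Set.empty K1)
        else PySem.Set.add (if g1.head?.isNone then PySem.Set.empty else PySem.Set.add PySem.Set.empty K1) K2) K3) →
      x = K1 ∨ x = K2 ∨ x = K3 := by
    intro x hx
    split at hx
    · rcases hm2 x hx with h | h
      · exact Or.inl h
      · exact Or.inr (Or.inl h)
    · rcases (PySem.Set.mem_add _ _ _).mp hx with h | h
      · rcases hm2 x h with h' | h'
        · exact Or.inl h'
        · exact Or.inr (Or.inl h')
      · exact Or.inr (Or.inr h)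
  rw [pv_dedup_group g4 K4 hg4 _ _
    (pv_contains_false _ K4 (fun hmem => by
      rcases hm3 K4 hmem with h | h | h
      · exact h14 h.symm
      · exact h24 h.symm
      · exact h34 h.symm))]
  simp [List.append_assoc]

-- A's pipeline after the first loop, as a function of the detected list
def pvTail (l : List (Int × String)) : List String :=
  let sortedSteps := PySem.List.sorted l (fun x => x.1)
  let res := sortedSteps.foldl (fun (st : List String × PySem.Set String) x =>
      let step_key := pvStepKey x.2
      if PySem.Set.contains st.2 step_key then st
      else (st.1 ++ [x.2], PySem.Set.add st.2 step_key)) ([], PySem.Set.empty)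
  if res.1.isEmpty then ["Follow the documentation steps in order"] else res.1

theorem pv_alt_fold (l : List (Int × List (String × String))) :
    ∀ s : Option Int × Option Int × Option Int × Option Int,
    l.foldl (fun (s : Option Int × Option Int × Option Int × Option Int) p =>
      let content := PySem.Str.lower (PySem.Dict.getD ⟨p.2⟩ "content" "")
      let f1 := if s.1.isNone && pvInstallKws.any (fun kw => PySem.Str.isIn kw content) then some p.1 else s.1
      let f2 := if s.2.1.isNone && pvConfigKws.any (fun kw => PySem.Str.isIn kw content) then some p.1 else s.2.1
      let f3 := if s.2.2.1.isNone && pvDeployKws.any (fun kw => PySem.Str.isIn kw content) then some p.1 else s.2.2.1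
      let f4 := if s.2.2.2.isNone && pvTestKws.any (fun kw => PySem.Str.isIn kw content) then some p.1 else s.2.2.2
      (f1, f2, f3, f4)) s
    = (l.foldl (fun o p => if o.isNone && pvD1 p.2 then some p.1 else o) s.1,
       l.foldl (fun o p => if o.isNone && pvD2 p.2 then some p.1 else o) s.2.1,
       l.foldl (fun o p => if o.isNone && pvD3 p.2 then some p.1 else o) s.2.2.1,
       l.foldl (fun o p => if o.isNone && pvD4 p.2 then some p.1 else o) s.2.2.2) := by
  induction l with
  | nil => intro s; rfl
  | cons p l ih =>
    intro s
    rw [List.foldl_cons, ih]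
    rfl

theorem pv_opt_steps {β : Type} (o : Option (Int × β)) (name : String) :
    (match o.map Prod.fst with | some i => [pvStepStr name i] | none => ([] : List String))
      = (o.map (fun p => pvStepStr name p.1)).toList := by
  cases o <;> rfl

theorem pv_main (parsed : List (String × List String)) (chunks : List (List (String × String))) :
    create_execution_order_steps parsed chunks = create_execution_order_steps_alt parsed chunks := by
  have hA : create_execution_order_steps parsed chunks
      = pvTail ((PySem.List.enumerate chunks).foldl (fun acc p =>
          let content := PySem.Dict.getD ⟨p.2⟩ "content" ""
          let acc := if detect_installation_step content then acc ++ [((1 : Int), pvStepStr "Install dependencies" p.1)] else acc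
          let acc := if detect_configuration_step content then acc ++ [((2 : Int), pvStepStr "Configure project settings" p.1)] else acc
          let acc := if detect_deployment_step content then acc ++ [((3 : Int), pvStepStr "Deploy contracts" p.1)] else acc
          let acc := if detect_testing_step content then acc ++ [((4 : Int), pvStepStr "Run tests" p.1)] else acc
          acc) []) := rfl
  have hbody : ((PySem.List.enumerate chunks).foldl (fun acc p =>
          let content := PySem.Dict.getD ⟨p.2⟩ "content" ""
          let acc := if detect_installation_step content then acc ++ [((1 : Int), pvStepStr "Install dependencies" p.1)] else acc
          let acc := if detect_configuration_step content then acc ++ [((2 : Int), pvStepStr "Configure project settings" p.1)] else acc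
          let acc := if detect_deployment_step content then acc ++ [((3 : Int), pvStepStr "Deploy contracts" p.1)] else acc
          let acc := if detect_testing_step content then acc ++ [((4 : Int), pvStepStr "Run tests" p.1)] else acc
          acc) []) = (PySem.List.enumerate chunks).flatMap pvEnt := by
    rw [show (fun (acc : List (Int × String)) (p : Int × List (String × String)) =>
          let content := PySem.Dict.getD ⟨p.2⟩ "content" ""
          let acc := if detect_installation_step content then acc ++ [((1 : Int), pvStepStr "Install dependencies" p.1)] else acc
          let acc := if detect_configuration_step content then acc ++ [((2 : Int), pvStepStr "Configure project settings" p.1)] else acc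
          let acc := if detect_deployment_step content then acc ++ [((3 : Int), pvStepStr "Deploy contracts" p.1)] else acc
          let acc := if detect_testing_step content then acc ++ [((4 : Int), pvStepStr "Run tests" p.1)] else acc
          acc) = (fun acc p => acc ++ pvEnt p) from funext fun acc => funext fun p => by
        simp only [pvEnt, pvD1, pvD2, pvD3, pvD4]
        split_ifs <;> simp]
    rw [PySem.List.foldl_append_eq_flatMap]
    simp
  rw [hA, hbody]
  -- keys of the detected list are in {1,2,3,4}
  have hsingle : ∀ (c : Bool) (y x : Int × String), x ∈ (if c then [y] else ([] : List (Int × String))) → x = y := by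
    intro c y x h
    split at h
    · simpa using h
    · simp at h
  have hkeys : ∀ x ∈ (PySem.List.enumerate chunks).flatMap pvEnt, x.1 = 1 ∨ x.1 = 2 ∨ x.1 = 3 ∨ x.1 = 4 := by
    intro x hx
    simp only [List.mem_flatMap] at hx
    obtain ⟨p, _, hp⟩ := hx
    simp only [pvEnt, List.mem_append] at hp
    rcases hp with ((h | h) | h) | h
    · rw [hsingle _ _ _ h]; simp
    · rw [hsingle _ _ _ h]; simp
    · rw [hsingle _ _ _ h]; simp
    · rw [hsingle _ _ _ h]; simp
  -- the tail of A's pipeline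
  have hgmem : ∀ (d : List (String × String) → Bool) (k : Int) (name K : String),
      (∀ i : Int, pvStepKey (pvStepStr name i) = K) →
      ∀ e : Int × String,
      e ∈ (PySem.List.enumerate chunks).flatMap (fun p => if d p.2 then [(k, pvStepStr name p.1)] else []) →
      pvStepKey e.2 = K := by
    intro d k name K hkey e he
    simp only [List.mem_flatMap] at he
    obtain ⟨p, _, hp⟩ := he
    split at hp
    · have : e = (k, pvStepStr name p.1) := by simpa using hp
      rw [this]
      exact hkey p.1
    · simp at hp
  have htail : pvTail ((PySem.List.enumerate chunks).flatMap pvEnt)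
      = (let steps :=
          ((((PySem.List.enumerate chunks).find? (fun p => pvD1 p.2)).map (fun p => pvStepStr "Install dependencies" p.1)).toList
            ++ (((PySem.List.enumerate chunks).find? (fun p => pvD2 p.2)).map (fun p => pvStepStr "Configure project settings" p.1)).toList
            ++ (((PySem.List.enumerate chunks).find? (fun p => pvD3 p.2)).map (fun p => pvStepStr "Deploy contracts" p.1)).toList
            ++ (((PySem.List.enumerate chunks).find? (fun p => pvD4 p.2)).map (fun p => pvStepStr "Run tests" p.1)).toList)
         if steps.isEmpty then ["Follow the documentation steps in order"] else steps) := by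
    simp only [pvTail]
    rw [pv_sorted_14 _ hkeys, pv_filter_ent_1, pv_filter_ent_2, pv_filter_ent_3, pv_filter_ent_4]
    rw [pv_dedup_4 _ _ _ _ "Install dependencies" "Configure project settings" "Deploy contracts" "Run tests"
        (hgmem _ _ _ _ pv_key_install) (hgmem _ _ _ _ pv_key_config)
        (hgmem _ _ _ _ pv_key_deploy) (hgmem _ _ _ _ pv_key_test)
        (by decide) (by decide) (by decide) (by decide) (by decide) (by decide)]
    rw [pv_flatMap_head, pv_flatMap_head, pv_flatMap_head, pv_flatMap_head]
    have efuse : ∀ (k : Int) (name : String) (o : Option (Int × List (String × String))),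
        Option.map Prod.snd (Option.map (fun p => (k, pvStepStr name p.1)) o)
          = Option.map (fun p => pvStepStr name p.1) o := by
      intro k name o; cases o <;> rfl
    rw [efuse, efuse, efuse, efuse]
  rw [htail]
  rw [show create_execution_order_steps_alt parsed chunks
      = (let st := (PySem.List.enumerate chunks).foldl
          (fun (s : Option Int × Option Int × Option Int × Option Int) p =>
            let content := PySem.Str.lower (PySem.Dict.getD ⟨p.2⟩ "content" "")
            let f1 := if s.1.isNone && pvInstallKws.any (fun kw => PySem.Str.isIn kw content) then some p.1 else s.1
            let f2 := if s.2.1.isNone && pvConfigKws.any (fun kw => PySem.Str.isIn kw content) then some p.1 else s.2.1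
            let f3 := if s.2.2.1.isNone && pvDeployKws.any (fun kw => PySem.Str.isIn kw content) then some p.1 else s.2.2.1
            let f4 := if s.2.2.2.isNone && pvTestKws.any (fun kw => PySem.Str.isIn kw content) then some p.1 else s.2.2.2
            (f1, f2, f3, f4)) (none, none, none, none)
         let steps :=
           (match st.1 with | some i => [pvStepStr "Install dependencies" i] | none => []) ++
           (match st.2.1 with | some i => [pvStepStr "Configure project settings" i] | none => []) ++
           (match st.2.2.1 with | some i => [pvStepStr "Deploy contracts" i] | none => []) ++
           (match st.2.2.2 with | some i => [pvStepStr "Run tests" i] | none => [])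
         if steps.isEmpty then ["Follow the documentation steps in order"] else steps) from rfl]
  rw [pv_alt_fold]
  simp only [pv_first_fold, pv_opt_steps]

-- ===== VERDICT (by name: the statement is the Claim_ definition above) =====
theorem create_execution_order_steps_spec : Claim_equal_create_execution_order_steps := by
  intro parsed chunks _
  unfold Spec_create_execution_order_steps
  exact pv_main parsed chunks
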